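-- pv_equiv track=rewrite | github.com/zhongch4g/leetcode-python | extra/longest_one_greater_zero.py | longest_one_greater_zero
-- ===== SOURCE A (Python) =====
-- def longest_one_greater_zero(nums):
--
--
--     nsum = 0
--     d = {0:-1}
--     length = 0
--     for i, num in enumerate(nums):
--         nsum += 1 if num == 1 else -1
--         if nsum not in d:
--             d[nsum] = i
--
--         if nsum - 1 in d and i - d[nsum - 1] > length:
--             length = i - d[nsum - 1]
--
--     return len(nums) if nsum > 0 else length
-- ===== SOURCE B (Python) =====
-- def longest_one_greater_zero(nums):
--     # Brute force: for each suffix start, scan forward keeping a running balance;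
--     # record the scan length whenever the balance is positive.
--     best = 0
--     suffix = nums
--     while suffix:
--         bal = 0
--         length = 0
--         for x in suffix:
--             bal += 1 if x == 1 else -1
--             length += 1
--             if bal > 0 and length > best:
--                 best = length
--         suffix = suffix[1:]
--     return best
-- ===== Notes on version B (the rewrite author's own statement) =====
-- stated objective: simpler
-- what changed: Replaced A's one-pass prefix-sum algorithm with a first-occurrence dict by a plain brute-force scan over all suffixes keeping a running +/-1 balance and recording the longest positive-balance window.
import Mathlib
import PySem

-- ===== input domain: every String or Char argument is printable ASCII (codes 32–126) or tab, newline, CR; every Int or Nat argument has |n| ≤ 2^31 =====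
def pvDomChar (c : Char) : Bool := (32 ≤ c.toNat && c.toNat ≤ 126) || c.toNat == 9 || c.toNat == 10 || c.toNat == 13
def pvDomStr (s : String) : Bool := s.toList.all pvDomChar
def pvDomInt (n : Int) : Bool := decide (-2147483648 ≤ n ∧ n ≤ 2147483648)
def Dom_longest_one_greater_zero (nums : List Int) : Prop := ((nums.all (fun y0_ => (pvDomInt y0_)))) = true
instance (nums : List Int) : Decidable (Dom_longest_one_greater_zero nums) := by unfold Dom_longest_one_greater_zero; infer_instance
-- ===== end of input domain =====

-- B replaces A's O(n) prefix-sum/first-occurrence dict with a plain brute-force scan over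
-- all suffixes (simpler to read; not faster).


-- ===== PORT A =====
-- one loop iteration of A: state (nsum, d, length), element (i, num)
def aStep (s : Int × PySem.Dict Int Int × Int) (p : Int × Int) : Int × PySem.Dict Int Int × Int :=
  let nsum := s.1 + (if p.2 = 1 then 1 else -1)
  let d := if s.2.1.contains nsum then s.2.1 else s.2.1.insert nsum p.1
  let length :=
    match d.get? (nsum - 1) with
    | some v => if p.1 - v > s.2.2 then p.1 - v else s.2.2
    | none => s.2.2
  (nsum, d, length)

def longest_one_greater_zero (nums : List Int) : Int :=
  let st := (PySem.List.enumerate nums).foldl aStep (0, (PySem.Dict.empty.insert 0 (-1)), 0)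
  if st.1 > 0 then (nums.length : Int) else st.2.2

-- ===== PORT B =====
-- inner 'for x in suffix' loop of B: state (bal, length, best)
def altStep (s : Int × Int × Int) (x : Int) : Int × Int × Int :=
  let bal := s.1 + (if x = 1 then 1 else -1)
  let length := s.2.1 + 1
  (bal, length, if bal > 0 ∧ length > s.2.2 then length else s.2.2)

def altScan (best : Int) (xs : List Int) : Int :=
  (xs.foldl altStep (0, 0, best)).2.2

-- outer 'while suffix' loop: process the current suffix, then drop its head
def altGo : List Int → Int → Int
  | [], best => best
  | x :: rest, best => altGo rest (altScan best (x :: rest))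

def longest_one_greater_zero_alt (nums : List Int) : Int := altGo nums 0

-- ===== PRECONDITION & SPEC =====
def Spec_longest_one_greater_zero (nums : List Int) (out : Int) : Prop := out = longest_one_greater_zero_alt nums
instance (nums : List Int) (out : Int) : Decidable (Spec_longest_one_greater_zero nums out) := by unfold Spec_longest_one_greater_zero; infer_instance

-- ===== CLAIM (what is proved, stated in full; the proofs are below) =====
def Claim_equal_longest_one_greater_zero : Prop := ∀ (nums : List Int), Dom_longest_one_greater_zero nums → Spec_longest_one_greater_zero nums (longest_one_greater_zero nums)

-- ===== LEMMAS AND PROOFS =====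

-- the ±1 value Python assigns to each element, and prefix balances
def pvVal (x : Int) : Int := if x = 1 then 1 else -1

def pvPfx (t : List Int) (k : Nat) : Int := ((t.take k).map pvVal).sum

-- a "good" pair (a,b): the subarray t[a:b] has positive balance
def Good (t : List Int) (a b : Nat) : Prop :=
  a < b ∧ b ≤ t.length ∧ 1 ≤ pvPfx t b - pvPfx t a

-- r is the length of the longest good subarray (0 if none)
def IsBest (t : List Int) (r : Int) : Prop :=
  0 ≤ r ∧ (r = 0 ∨ ∃ a b : Nat, Good t a b ∧ r = (b : Int) - (a : Int)) ∧
    (∀ a b : Nat, Good t a b → (b : Int) - (a : Int) ≤ r)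

lemma isBest_unique {t : List Int} {r₁ r₂ : Int} (h₁ : IsBest t r₁) (h₂ : IsBest t r₂) : r₁ = r₂ := by
  obtain ⟨hn1, he1, hu1⟩ := h₁
  obtain ⟨hn2, he2, hu2⟩ := h₂
  apply le_antisymm
  · rcases he1 with h | ⟨a, b, hg, hr⟩
    · omega
    · exact hr ▸ hu2 a b hg
  · rcases he2 with h | ⟨a, b, hg, hr⟩
    · omega
    · exact hr ▸ hu1 a b hg

lemma pvPfx_zero (t : List Int) : pvPfx t 0 = 0 := rfl

lemma pvPfx_succ (t : List Int) (k : Nat) (h : k < t.length) :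
    pvPfx t (k + 1) = pvPfx t k + pvVal t[k] := by
  have h2 : t.take (k + 1) = t.take k ++ [t[k]] := by
    rw [List.take_add_one, List.getElem?_eq_getElem h]
    rfl
  rw [pvPfx, pvPfx, h2, List.map_append, List.sum_append]
  simp

lemma pvVal_cases (x : Int) : pvVal x = 1 ∨ pvVal x = -1 := by
  unfold pvVal; split <;> simp

lemma pvPfx_append (t : List Int) (x : Int) (k : Nat) (h : k ≤ t.length) :
    pvPfx (t ++ [x]) k = pvPfx t k := by
  simp [pvPfx, List.take_append_of_le_length h]

lemma pvPfx_append_top (t : List Int) (x : Int) :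
    pvPfx (t ++ [x]) (t.length + 1) = pvPfx t t.length + pvVal x := by
  have : (t ++ [x]).take (t.length + 1) = t ++ [x] := by
    apply List.take_of_length_le; simp
  simp [pvPfx, this, List.take_of_length_le (le_refl t.length)]

lemma pvPfx_pos_imp (t : List Int) {b : Nat} (h : 1 ≤ pvPfx t b) : 1 ≤ b := by
  by_contra hb
  have : b = 0 := by omega
  simp [this, pvPfx_zero] at h

-- sum of the window t[a:a+L) in terms of prefixes
lemma sum_window (t : List Int) (a L : Nat) :
    (((t.drop a).take L).map pvVal).sum = pvPfx t (a + L) - pvPfx t a := by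
  have : t.take (a + L) = t.take a ++ (t.drop a).take L := List.take_add ..
  simp [pvPfx, this]

-- discrete IVT (downward crossing): prefix balances move by ±1
lemma ivt_down (t : List Int) (v : Int) (a : Nat) :
    ∀ b : Nat, a ≤ b → b ≤ t.length → v ≤ pvPfx t a → pvPfx t b ≤ v →
      ∃ m, a ≤ m ∧ m ≤ b ∧ pvPfx t m = v := by
  intro b
  induction b with
  | zero =>
    intro hab _ hva hbv
    have ha : a = 0 := Nat.le_zero.mp hab
    subst ha
    exact ⟨0, le_refl 0, le_refl 0, by omega⟩
  | succ b ih =>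
    intro hab hble hva hbv
    by_cases hb : a ≤ b
    · have hstep := pvPfx_succ t b (by omega)
      by_cases hc : pvPfx t b ≤ v
      · obtain ⟨m, h1, h2, h3⟩ := ih hb (by omega) hva hc
        exact ⟨m, h1, by omega, h3⟩
      · rcases pvVal_cases t[b] with h | h <;>
          exact ⟨b + 1, by omega, le_refl _, by omega⟩
    · have ha : a = b + 1 := by omega
      subst ha
      exact ⟨b + 1, le_refl _, le_refl _, by omega⟩

-- first index m ≤ k with pvPfx t m = v
def fo (t : List Int) (v : Int) : Nat → Option Nat
  | 0 => if pvPfx t 0 = v then some 0 else none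
  | k + 1 =>
    match fo t v k with
    | some m => some m
    | none => if pvPfx t (k + 1) = v then some (k + 1) else none

lemma fo_zero (t : List Int) (v : Int) : fo t v 0 = if pvPfx t 0 = v then some 0 else none := rfl

lemma fo_succ (t : List Int) (v : Int) (k : Nat) :
    fo t v (k + 1) = match fo t v k with
      | some m => some m
      | none => if pvPfx t (k + 1) = v then some (k + 1) else none := rfl

lemma fo_some {t : List Int} {v : Int} : ∀ {k m : Nat}, fo t v k = some m → m ≤ k ∧ pvPfx t m = v := by
  intro k
  induction k with
  | zero =>
    intro m h
    rw [fo_zero] at h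
    by_cases hv : pvPfx t 0 = v
    · simp [hv] at h
      subst h
      exact ⟨le_refl 0, hv⟩
    · simp [hv] at h
  | succ k ih =>
    intro m h
    rw [fo_succ] at h
    rcases hk : fo t v k with _ | m'
    · rw [hk] at h
      by_cases hv : pvPfx t (k + 1) = v
      · simp [hv] at h
        subst h
        exact ⟨le_refl _, hv⟩
      · simp [hv] at h
    · rw [hk] at h
      simp at h
      subst h
      obtain ⟨h1, h2⟩ := ih hk
      exact ⟨by omega, h2⟩

lemma fo_min {t : List Int} {v : Int} : ∀ {k m : Nat}, m ≤ k → pvPfx t m = v →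
    ∃ m₀, fo t v k = some m₀ ∧ m₀ ≤ m := by
  intro k
  induction k with
  | zero =>
    intro m hm hv
    have hm0 : m = 0 := by omega
    subst hm0
    exact ⟨0, by rw [fo_zero]; simp [hv], le_refl 0⟩
  | succ k ih =>
    intro m hm hv
    rcases hk : fo t v k with _ | m'
    · by_cases hmk : m ≤ k
      · obtain ⟨m₀, h1, h2⟩ := ih hmk hv
        rw [hk] at h1
        exact absurd h1 (by simp)
      · have hm1 : m = k + 1 := by omega
        subst hm1
        exact ⟨k + 1, by rw [fo_succ, hk]; simp [hv], le_refl _⟩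
    · by_cases hmk : m ≤ k
      · obtain ⟨m₀, h1, h2⟩ := ih hmk hv
        rw [hk] at h1
        simp at h1
        subst h1
        exact ⟨m', by rw [fo_succ, hk], h2⟩
      · exact ⟨m', by rw [fo_succ, hk], by have := (fo_some hk).1; omega⟩

lemma fo_congr {t t' : List Int} {v : Int} : ∀ {k : Nat}, (∀ j, j ≤ k → pvPfx t' j = pvPfx t j) →
    fo t' v k = fo t v k := by
  intro k
  induction k with
  | zero =>
    intro h
    rw [fo_zero, fo_zero, h 0 (le_refl 0)]
  | succ k ih =>
    intro h
    rw [fo_succ, fo_succ, ih (fun j hj => h j (by omega)), h (k + 1) (le_refl _)]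

-- invariant for A's 'length' accumulator after the whole loop
def LInv (t : List Int) (len : Int) : Prop :=
  0 ≤ len ∧
  (len = 0 ∨ ∃ b m : Nat, 1 ≤ b ∧ b ≤ t.length ∧ fo t (pvPfx t b - 1) b = some m ∧ len = (b : Int) - (m : Int)) ∧
  (∀ b m : Nat, 1 ≤ b → b ≤ t.length → fo t (pvPfx t b - 1) b = some m → (b : Int) - (m : Int) ≤ len)

-- characterization of A's fold
lemma afold_spec (t : List Int) :
    (((PySem.List.enumerate t).foldl aStep (0, (PySem.Dict.empty.insert 0 (-1)), 0)).1 = pvPfx t t.length) ∧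
    (∀ v : Int, ((PySem.List.enumerate t).foldl aStep (0, (PySem.Dict.empty.insert 0 (-1)), 0)).2.1.get? v
        = Option.map (fun m : Nat => (m : Int) - 1) (fo t v t.length)) ∧
    LInv t ((PySem.List.enumerate t).foldl aStep (0, (PySem.Dict.empty.insert 0 (-1)), 0)).2.2 := by
  induction t using List.reverseRecOn with
  | nil =>
    simp only [PySem.List.enumerate_nil, List.foldl_nil, List.length_nil]
    refine ⟨rfl, ?_, ?_⟩
    · intro v
      by_cases hv : v = 0
      · subst hv
        rw [PySem.Dict.get?_insert_self, fo_zero]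
        norm_num [pvPfx_zero]
      · rw [PySem.Dict.get?_insert_of_ne _ _ hv, PySem.Dict.get?_empty, fo_zero]
        rw [if_neg (by rw [pvPfx_zero]; omega)]
        rfl
    · refine ⟨le_refl 0, Or.inl rfl, ?_⟩
      intro b m hb1 hb2 _
      simp at hb2
      omega
  | append_singleton t x ih =>
    set st := (PySem.List.enumerate t).foldl aStep (0, (PySem.Dict.empty.insert 0 (-1)), 0) with hst
    obtain ⟨hsum, hd, hL⟩ := ih
    have henum : PySem.List.enumerate (t ++ [x]) = PySem.List.enumerate t ++ [((t.length : Int), x)] := by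
      rw [PySem.List.enumerate_append]
      simp [PySem.List.enumerate_cons, PySem.List.enumerate_nil]
    have hfold : (PySem.List.enumerate (t ++ [x])).foldl aStep (0, (PySem.Dict.empty.insert 0 (-1)), 0)
        = aStep st ((t.length : Int), x) := by
      rw [henum, List.foldl_append, ← hst]
      rfl
    set nsum1 := st.1 + (if x = 1 then 1 else -1) with hnsum1
    have hns : nsum1 = pvPfx (t ++ [x]) (t.length + 1) := by
      rw [hnsum1, hsum, pvPfx_append_top]
      simp [pvVal]
    have hpfx : ∀ j, j ≤ t.length → pvPfx (t ++ [x]) j = pvPfx t j := fun j hj => pvPfx_append t x j hj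
    have hfoc : ∀ v : Int, fo (t ++ [x]) v t.length = fo t v t.length :=
      fun v => fo_congr (fun j hj => hpfx j hj)
    have hstep_fo : ∀ v : Int, fo (t ++ [x]) v (t.length + 1)
        = match fo t v t.length with
          | some m => some m
          | none => if nsum1 = v then some (t.length + 1) else none := by
      intro v
      rw [fo_succ, hfoc v, ← hns]
    have hlen' : (t ++ [x]).length = t.length + 1 := by simp
    have hA1 : (aStep st ((t.length : Int), x)).1 = nsum1 := rfl
    have hA2 : (aStep st ((t.length : Int), x)).2.1
        = (if st.2.1.contains nsum1 then st.2.1 else st.2.1.insert nsum1 (t.length : Int)) := rfl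
    have hcont : st.2.1.contains nsum1 = (fo t nsum1 t.length).isSome := by
      rw [PySem.Dict.contains_eq_isSome_get?, hd nsum1]
      simp
    -- dict invariant after the step
    have hd' : ∀ v : Int, (aStep st ((t.length : Int), x)).2.1.get? v
        = Option.map (fun m : Nat => (m : Int) - 1) (fo (t ++ [x]) v (t.length + 1)) := by
      intro v
      rw [hA2, hstep_fo v]
      rcases hcm : fo t nsum1 t.length with _ | m
      · have hcf : st.2.1.contains nsum1 = false := by rw [hcont, hcm]; rfl
        rw [if_neg (by simp [hcf])]
        by_cases hv : v = nsum1
        · subst hv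
          rw [PySem.Dict.get?_insert_self, hcm]
          simp only
          congr 1
          push_cast
          ring
        · rw [PySem.Dict.get?_insert_of_ne _ _ hv, hd v]
          rcases hfv : fo t v t.length with _ | m'
          · have hne : ¬ nsum1 = v := fun hh => hv hh.symm
            simp [hne]
          · simp
      · have hct : st.2.1.contains nsum1 = true := by rw [hcont, hcm]; rfl
        rw [if_pos (by simp [hct]), hd v]
        rcases hfv : fo t v t.length with _ | m'
        · have hvne : v ≠ nsum1 := by
            intro h
            rw [h, hcm] at hfv
            cases hfv
          have hne : ¬ nsum1 = v := fun hh => hvne hh.symm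
          simp [hne]
        · simp
    refine ⟨?_, ?_, ?_⟩
    · rw [hfold, hA1, hns, hlen']
    · intro v
      rw [hfold, hlen']
      exact hd' v
    · -- length invariant after the step
      obtain ⟨hl0, hla, hlu⟩ := hL
      have htr : ∀ b, b ≤ t.length →
          fo (t ++ [x]) (pvPfx (t ++ [x]) b - 1) b = fo t (pvPfx t b - 1) b := by
        intro b hb
        rw [hpfx b hb]
        exact fo_congr (fun j hj => hpfx j (le_trans hj hb))
      have hnsm1 : nsum1 - 1 = pvPfx (t ++ [x]) (t.length + 1) - 1 := by rw [hns]
      have hDg : (if st.2.1.contains nsum1 then st.2.1 else st.2.1.insert nsum1 (t.length : Int)).get? (nsum1 - 1)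
          = Option.map (fun m : Nat => (m : Int) - 1) (fo (t ++ [x]) (pvPfx (t ++ [x]) (t.length + 1) - 1) (t.length + 1)) := by
        rw [← hA2, hd' (nsum1 - 1), hnsm1]
      have hA3 : (aStep st ((t.length : Int), x)).2.2
          = (match (if st.2.1.contains nsum1 then st.2.1 else st.2.1.insert nsum1 (t.length : Int)).get? (nsum1 - 1) with
            | some v => if (t.length : Int) - v > st.2.2 then (t.length : Int) - v else st.2.2
            | none => st.2.2) := rfl
      rw [hfold]
      unfold LInv
      rw [hlen', hA3]
      rcases hfoN : fo (t ++ [x]) (pvPfx (t ++ [x]) (t.length + 1) - 1) (t.length + 1) with _ | m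
      · have hDg' : (if st.2.1.contains nsum1 then st.2.1 else st.2.1.insert nsum1 (t.length : Int)).get? (nsum1 - 1)
            = none := by rw [hDg, hfoN]; rfl
        rw [hDg']
        refine ⟨hl0, ?_, ?_⟩
        · rcases hla with h | ⟨b, m, h1, h2, h3, h4⟩
          · exact Or.inl h
          · exact Or.inr ⟨b, m, h1, by omega, by rw [htr b h2]; exact h3, h4⟩
        · intro b m hb1 hb2 hfo2
          rcases Nat.lt_or_ge b (t.length + 1) with hb | hb
          · rw [htr b (by omega)] at hfo2
            exact hlu b m hb1 (by omega) hfo2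
          · have hbe : b = t.length + 1 := by omega
            subst hbe
            rw [hfoN] at hfo2
            cases hfo2
      · have hDg' : (if st.2.1.contains nsum1 then st.2.1 else st.2.1.insert nsum1 (t.length : Int)).get? (nsum1 - 1)
            = some ((m : Int) - 1) := by rw [hDg, hfoN]; rfl
        rw [hDg']
        dsimp only
        obtain ⟨hmle, _⟩ := fo_some hfoN
        have hmc : (m : Int) ≤ (t.length : Int) + 1 := by exact_mod_cast hmle
        refine ⟨?_, ?_, ?_⟩
        · split_ifs with hgt
          · linarith
          · exact hl0
        · split_ifs with hgt
          · refine Or.inr ⟨t.length + 1, m, by omega, le_refl _, hfoN, by push_cast; ring⟩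
          · rcases hla with h | ⟨b, m', h1, h2, h3, h4⟩
            · exact Or.inl h
            · exact Or.inr ⟨b, m', h1, by omega, by rw [htr b h2]; exact h3, h4⟩
        · intro b m' hb1 hb2 hfo2
          rcases Nat.lt_or_ge b (t.length + 1) with hb | hb
          · rw [htr b (by omega)] at hfo2
            have := hlu b m' hb1 (by omega) hfo2
            split_ifs with hgt
            · linarith
            · exact this
          · have hbe : b = t.length + 1 := by omega
            subst hbe
            rw [hfoN] at hfo2
            injection hfo2 with hme
            subst hme
            split_ifs with hgt
            · push_cast
              linarith
            · push_cast
              push_cast at hgt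
              linarith

-- characterization of B's inner scan
lemma scan_spec (xs : List Int) : ∀ (bal0 len0 best0 : Int),
    best0 ≤ (xs.foldl altStep (bal0, len0, best0)).2.2 ∧
    (∀ L : Nat, 1 ≤ L → L ≤ xs.length → 0 < bal0 + ((xs.take L).map pvVal).sum →
      len0 + (L : Int) ≤ (xs.foldl altStep (bal0, len0, best0)).2.2) ∧
    ((xs.foldl altStep (bal0, len0, best0)).2.2 = best0 ∨
      ∃ L : Nat, 1 ≤ L ∧ L ≤ xs.length ∧ 0 < bal0 + ((xs.take L).map pvVal).sum ∧
        (xs.foldl altStep (bal0, len0, best0)).2.2 = len0 + (L : Int)) := by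
  induction xs with
  | nil =>
    intro bal0 len0 best0
    refine ⟨le_refl _, ?_, Or.inl rfl⟩
    intro L hL1 hL2 _
    simp at hL2
    omega
  | cons x t ih =>
    intro bal0 len0 best0
    have hstep : (x :: t).foldl altStep (bal0, len0, best0)
        = t.foldl altStep (bal0 + pvVal x, len0 + 1,
            if bal0 + pvVal x > 0 ∧ len0 + 1 > best0 then len0 + 1 else best0) := by
      simp [altStep, pvVal]
    rw [hstep]
    obtain ⟨i1, i2, i3⟩ := ih (bal0 + pvVal x) (len0 + 1)
      (if bal0 + pvVal x > 0 ∧ len0 + 1 > best0 then len0 + 1 else best0)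
    have hb0 : best0 ≤ (if bal0 + pvVal x > 0 ∧ len0 + 1 > best0 then len0 + 1 else best0) := by
      split_ifs with h
      · omega
      · exact le_refl _
    have hb1 : bal0 + pvVal x > 0 →
        len0 + 1 ≤ (if bal0 + pvVal x > 0 ∧ len0 + 1 > best0 then len0 + 1 else best0) := by
      intro hpos
      split_ifs with h
      · exact le_refl _
      · omega
    refine ⟨le_trans hb0 i1, ?_, ?_⟩
    · intro L hL1 hL2 hpos
      obtain ⟨L', rfl⟩ : ∃ L', L = L' + 1 := ⟨L - 1, by omega⟩
      rw [List.take_succ_cons, List.map_cons, List.sum_cons] at hpos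
      rcases Nat.eq_zero_or_pos L' with hL0 | hL0
      · subst hL0
        simp at hpos
        have := le_trans (hb1 (by omega)) i1
        push_cast
        omega
      · have := i2 L' (by omega) (by simpa using hL2) (by omega)
        push_cast
        push_cast at this
        omega
    · rcases i3 with hR | ⟨L', h1, h2, h3, h4⟩
      · by_cases hc : bal0 + pvVal x > 0 ∧ len0 + 1 > best0
        · have hR' : (t.foldl altStep (bal0 + pvVal x, len0 + 1,
              if bal0 + pvVal x > 0 ∧ len0 + 1 > best0 then len0 + 1 else best0)).2.2
              = len0 + 1 := by rw [hR, if_pos hc]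
          refine Or.inr ⟨1, le_refl 1, by simp, ?_, by rw [hR']; push_cast; ring⟩
          simp
          omega
        · exact Or.inl (by rw [hR, if_neg hc])
      · refine Or.inr ⟨L' + 1, by omega, by simpa using h2, ?_, ?_⟩
        · rw [List.take_succ_cons, List.map_cons, List.sum_cons]
          omega
        · rw [h4]
          push_cast
          ring

-- characterization of B's outer loop
lemma go_spec : ∀ (t : List Int) (best0 : Int),
    best0 ≤ altGo t best0 ∧
    (∀ a L : Nat, 1 ≤ L → a + L ≤ t.length → 0 < (((t.drop a).take L).map pvVal).sum →
      (L : Int) ≤ altGo t best0) ∧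
    (altGo t best0 = best0 ∨
      ∃ a L : Nat, 1 ≤ L ∧ a + L ≤ t.length ∧ 0 < (((t.drop a).take L).map pvVal).sum ∧
        altGo t best0 = (L : Int)) := by
  intro t
  induction t with
  | nil =>
    intro best0
    refine ⟨le_refl _, ?_, Or.inl rfl⟩
    intro a L hL1 hL2 _
    simp at hL2
    omega
  | cons x rest ih =>
    intro best0
    have hgo : altGo (x :: rest) best0 = altGo rest (altScan best0 (x :: rest)) := rfl
    obtain ⟨s1, s2, s3⟩ := scan_spec (x :: rest) 0 0 best0
    obtain ⟨g1, g2, g3⟩ := ih (altScan best0 (x :: rest))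
    have hsc : altScan best0 (x :: rest) = ((x :: rest).foldl altStep (0, 0, best0)).2.2 := rfl
    rw [hgo]
    refine ⟨le_trans (by rw [hsc]; exact s1) g1, ?_, ?_⟩
    · intro a L hL1 hL2 hpos
      rcases a with _ | a'
      · have := s2 L hL1 (by simpa using hL2) (by simpa using hpos)
        rw [← hsc] at this
        calc (L : Int) = 0 + L := by ring
          _ ≤ altScan best0 (x :: rest) := this
          _ ≤ _ := g1
      · exact g2 a' L hL1 (by simp at hL2; omega) (by simpa using hpos)
    · rcases g3 with hR | ⟨a, L, h1, h2, h3, h4⟩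
      · rcases s3 with hB | ⟨L, h1, h2, h3, h4⟩
        · refine Or.inl ?_
          rw [hR, hsc]
          exact hB
        · refine Or.inr ⟨0, L, h1, by simpa using h2, by simpa using h3, ?_⟩
          rw [hR, hsc, h4]
          ring
      · exact Or.inr ⟨a + 1, L, h1, by simp; omega, by simpa using h3, h4⟩

lemma isBest_B (t : List Int) : IsBest t (longest_one_greater_zero_alt t) := by
  unfold longest_one_greater_zero_alt
  obtain ⟨h1, h2, h3⟩ := go_spec t 0
  refine ⟨h1, ?_, ?_⟩
  · rcases h3 with h | ⟨a, L, hL1, hL2, hpos, hr⟩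
    · exact Or.inl h
    · refine Or.inr ⟨a, a + L, ⟨by omega, hL2, ?_⟩, by rw [hr]; push_cast; ring⟩
      rw [sum_window] at hpos
      omega
  · intro a b ⟨hab, hble, hsum⟩
    have hba : a + (b - a) = b := by omega
    have h := h2 a (b - a) (by omega) (by omega) (by rw [sum_window, hba]; omega)
    have hc : ((b - a : Nat) : Int) = (b : Int) - (a : Int) := by omega
    rw [hc] at h
    exact h

lemma isBest_A (t : List Int) : IsBest t (longest_one_greater_zero t) := by
  obtain ⟨hsum, _, ⟨hlen0, hatt, hub⟩⟩ := afold_spec t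
  unfold longest_one_greater_zero
  dsimp only
  split
  case isTrue hpos =>
    rw [hsum] at hpos
    have hb1 : 1 ≤ t.length := pvPfx_pos_imp t (by omega)
    refine ⟨by positivity, Or.inr ⟨0, t.length, ⟨by omega, le_refl _, by rw [pvPfx_zero]; omega⟩, by simp⟩, ?_⟩
    intro a b ⟨hab, hble, _⟩; omega
  case isFalse hnpos =>
    rw [hsum] at hnpos
    refine ⟨hlen0, ?_, ?_⟩
    · rcases hatt with h | ⟨b, m, hb1, hble, hfo, hlen⟩
      · exact Or.inl h
      · obtain ⟨hmb, hpm⟩ := fo_some hfo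
        refine Or.inr ⟨m, b, ⟨?_, hble, by omega⟩, hlen⟩
        rcases Nat.lt_or_ge m b with h | h
        · exact h
        · have : m = b := by omega
          subst this; omega
    · -- the combinatorial heart: every good pair is dominated by a recorded contribution
      intro a b ⟨hab, hble, hgood⟩
      by_cases hcase : pvPfx t b ≤ 1
      · -- pvPfx t b - 1 ≤ 0 = pvPfx t 0; the first index with that balance is ≤ a
        obtain ⟨m, hm0, hma, hpm⟩ := ivt_down t (pvPfx t b - 1) 0 a (by omega) (by omega)
          (by rw [pvPfx_zero]; omega) (by omega)
        obtain ⟨m₀, hfo, hm₀⟩ := fo_min (t := t) (m := m) (k := b) (by omega) hpm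
        have := hub b m₀ (by omega) hble hfo
        omega
      · -- pvPfx t b ≥ 2: balance later crosses 1, recording a longer full-prefix contribution
        obtain ⟨c, hbc, hcn, hpc⟩ := ivt_down t 1 b t.length hble (le_refl _) (by omega) (by omega)
        have hfo : fo t (pvPfx t c - 1) c = some 0 := by
          obtain ⟨m₀, hfo, hm₀⟩ := fo_min (t := t) (v := pvPfx t c - 1) (m := 0) (k := c) (by omega)
            (by rw [pvPfx_zero, hpc]; norm_num)
          have : m₀ = 0 := by omega
          subst this; exact hfo
        have := hub c 0 (by omega) hcn hfo
        omega

-- ===== VERDICT (by name: the statement is the Claim_ definition above) =====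
theorem longest_one_greater_zero_spec : Claim_equal_longest_one_greater_zero := by
  intro nums _
  unfold Spec_longest_one_greater_zero
  exact isBest_unique (isBest_A nums) (isBest_B nums)
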